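-- pv_equiv track=rewrite | github.com/katealtonwilliams/AdventOfCode-2024 | day12/day12_solution.py | get_ordered_points
-- ===== SOURCE A (Python) =====
-- import copy
--
-- def get_orthogonal_plants(point: tuple[int]):
--     directions = [(1, 0), (-1, 0), (0, 1), (0, -1)]
--     return [
--         (point[0] + direction[0], point[1] + direction[1]) for direction in directions
--     ]
--
-- def get_ordered_points(points: set[tuple[int]]) -> list[int]:
--     all_border_boys = []
--     region_to_edit = copy.deepcopy(points)
--     rows = [point[0] for point in region_to_edit]
--     top_row = min(rows)
--     points_on_row = [point[1] for point in region_to_edit if point[0] == top_row]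
--     current_point = (top_row, min(points_on_row))
--     current_ordered_region = [current_point]
--     region_to_edit.remove(current_point)
--     while region_to_edit:
--         found_point = False
--         for point in get_orthogonal_plants(current_point):
--             if point in region_to_edit:
--                 current_ordered_region.append(point)
--                 region_to_edit.remove(point)
--                 current_point = point
--                 found_point = True
--                 break
--         if not found_point and region_to_edit:
--             all_border_boys.append(current_ordered_region)
--             rows = [point[0] for point in region_to_edit]
--             top_row = min(rows)
--             points_on_row = [
--                 point[1] for point in region_to_edit if point[0] == top_row
--             ]
--             current_point = (top_row, min(points_on_row))
--             current_ordered_region = [current_point]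
--             region_to_edit.remove(current_point)
--     all_border_boys.append(current_ordered_region)
--     return all_border_boys
-- ===== SOURCE B (Python) =====
-- def get_ordered_points(points):
--     # Sort the points once (lexicographically); restart selection is then a single
--     # forward pointer over the sorted list instead of a min-scan of the remaining set.
--     remaining = set(points)
--     order = sorted(remaining)
--     idx = 0
--     chains = []
--     while remaining:
--         while order[idx] not in remaining:
--             idx += 1
--         start = order[idx]
--         idx += 1
--         remaining.remove(start)
--         chain = [start]
--         cur = start
--         while True:
--             nxt = None
--             for d in ((1, 0), (-1, 0), (0, 1), (0, -1)):
--                 cand = (cur[0] + d[0], cur[1] + d[1])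
--                 if cand in remaining:
--                     nxt = cand
--                     break
--             if nxt is None:
--                 break
--             remaining.remove(nxt)
--             chain.append(nxt)
--             cur = nxt
--         chains.append(chain)
--     return chains
-- ===== Notes on version B (the rewrite author's own statement) =====
-- stated objective: faster
-- what changed: B sorts the distinct points once and selects each chain-restart point with a forward pointer over the sorted list, replacing A's per-restart rebuild-and-min scans of the remaining set.
import Mathlib
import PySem

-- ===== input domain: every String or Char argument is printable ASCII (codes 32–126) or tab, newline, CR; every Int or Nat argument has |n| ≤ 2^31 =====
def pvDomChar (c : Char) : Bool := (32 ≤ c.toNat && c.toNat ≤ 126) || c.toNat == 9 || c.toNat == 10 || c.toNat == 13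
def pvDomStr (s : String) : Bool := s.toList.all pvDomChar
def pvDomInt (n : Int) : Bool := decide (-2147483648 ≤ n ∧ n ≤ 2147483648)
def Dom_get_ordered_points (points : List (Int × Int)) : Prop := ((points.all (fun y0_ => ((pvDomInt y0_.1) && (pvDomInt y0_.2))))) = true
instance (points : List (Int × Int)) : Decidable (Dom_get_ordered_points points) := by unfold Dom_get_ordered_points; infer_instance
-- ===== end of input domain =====

-- B sorts the points once and restarts chains via a forward pointer over the sorted
-- list instead of A's per-restart min-scan of the remaining set (objective: faster).


-- ===== PORT A =====
def get_orthogonal_plants (point : Int × Int) : List (Int × Int) :=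
  [((1 : Int), (0 : Int)), (-1, 0), (0, 1), (0, -1)].map
    (fun d => (point.1 + d.1, point.2 + d.2))

-- A's restart selection: top_row = min(rows); current = (top_row, min(points_on_row)).
-- none ↔ the set is empty (Python's min raises ValueError there; excluded by Pre_).
def pvAMin (region : PySem.Set (Int × Int)) : Option (Int × Int) :=
  match PySem.List.min? (region.map Prod.fst) (fun r => r) with
  | none => none
  | some top =>
    match PySem.List.min? ((region.filter (fun p => p.1 == top)).map Prod.snd) (fun c => c) with
    | none => none
    | some c => some (top, c)

-- A's while loop. 'for point in get_orthogonal_plants(...): if point in region: … break'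
-- is List.find?; 'region.remove(point)' on a member of the Set is List.erase (exact: no KeyError).
def pvALoop (region : PySem.Set (Int × Int)) (cur : Int × Int)
    (chain : List (Int × Int)) (acc : List (List (Int × Int))) : List (List (Int × Int)) :=
  if region = [] then acc ++ [chain] else
  match h : (get_orthogonal_plants cur).find? (fun p => region.contains p) with
  | some p =>
      pvALoop (region.erase p) p (chain ++ [p]) acc
  | none =>
      match hm : pvAMin region with
      | none => acc ++ [chain]  -- unreachable: region ≠ []
      | some m => pvALoop (region.erase m) m [m] (acc ++ [chain])
termination_by region.length
decreasing_by
  · have hp : p ∈ region := by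
      have := List.find?_some h
      simpa [PySem.Set.contains] using this
    have h1 := List.length_erase_of_mem hp
    have h2 : 0 < region.length := List.length_pos_of_mem hp
    simp_wf
    omega
  · have hmem : m ∈ region := by
      unfold pvAMin at hm
      rcases h1 : PySem.List.min? (region.map Prod.fst) (fun r => r) with _ | top
      · simp [h1] at hm
      · rcases h2 : PySem.List.min? ((region.filter (fun p => p.1 == top)).map Prod.snd) (fun c => c) with _ | c
        · simp [h1, h2] at hm
        · have hc := PySem.List.min?_mem h2
          simp only [List.mem_map, List.mem_filter] at hc
          obtain ⟨q, ⟨hqR, hqtop⟩, hqc⟩ := hc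
          simp [h1, h2] at hm
          have : q = m := by
            rcases q with ⟨q1, q2⟩
            simp at hqtop hqc
            simp [← hm, hqtop, hqc]
          rwa [this] at hqR
    have h1 := List.length_erase_of_mem hmem
    have h2 : 0 < region.length := List.length_pos_of_mem hmem
    simp_wf
    omega

def get_ordered_points (points : List (Int × Int)) : List (List (Int × Int)) :=
  let region := PySem.Set.ofList points
  match pvAMin region with
  | none => []  -- empty set: Python raises ValueError here; excluded by Pre_
  | some m => pvALoop (region.erase m) m [m] []

-- ===== PORT B =====
-- B's inner walk ('while True: … for d in directions: … break / else break').
def pvBWalk (remaining : PySem.Set (Int × Int)) (cur : Int × Int)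
    (chain : List (Int × Int)) : List (Int × Int) × PySem.Set (Int × Int) :=
  match h : ((([((1 : Int), (0 : Int)), (-1, 0), (0, 1), (0, -1)].map
      (fun d => (cur.1 + d.1, cur.2 + d.2))).find? (fun p => remaining.contains p))) with
  | some p => pvBWalk (remaining.erase p) p (chain ++ [p])
  | none => (chain, remaining)
termination_by remaining.length
decreasing_by
  have hp : p ∈ remaining := by
    have := List.find?_some h
    simpa [PySem.Set.contains] using this
  have h1 := List.length_erase_of_mem hp
  have h2 : 0 < remaining.length := List.length_pos_of_mem hp
  simp_wf
  omega

-- B's outer loop: the forward pointer 'idx' over the sorted list is the remaining suffix 'order'.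
def pvBMain (order : List (Int × Int)) (remaining : PySem.Set (Int × Int))
    (chains : List (List (Int × Int))) : List (List (Int × Int)) :=
  if remaining = [] then chains else
  match order with
  | [] => chains  -- unreachable: remaining ⊆ order (Python would IndexError)
  | o :: rest =>
    if remaining.contains o then
      let r := pvBWalk (remaining.erase o) o [o]
      pvBMain rest r.2 (chains ++ [r.1])
    else pvBMain rest remaining chains

def get_ordered_points_alt (points : List (Int × Int)) : List (List (Int × Int)) :=
  let remaining := PySem.Set.ofList points
  let order := PySem.List.sorted2 remaining Prod.fst Prod.snd  -- sorted(remaining): tuples compare lexicographically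
  pvBMain order remaining []

-- ===== PRECONDITION & SPEC =====
-- Pre_ excludes only the empty list: there Python's A raises ValueError (min of empty sequence).
def Pre_get_ordered_points (points : List (Int × Int)) : Prop := points ≠ []
instance (points : List (Int × Int)) : Decidable (Pre_get_ordered_points points) := by
  unfold Pre_get_ordered_points; infer_instance
def pvWitness_get_ordered_points : (List (Int × Int)) := [(0, 0), (0, 1), (2, 2)]

def Spec_get_ordered_points (points : List (Int × Int)) (out : List (List (Int × Int))) : Prop := out = get_ordered_points_alt points
instance (points : List (Int × Int)) (out : List (List (Int × Int))) : Decidable (Spec_get_ordered_points points out) := by unfold Spec_get_ordered_points; infer_instance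

-- ===== CLAIM (what is proved, stated in full; the proofs are below) =====
def Claim_equal_get_ordered_points : Prop := ∀ (points : List (Int × Int)), Dom_get_ordered_points points → Pre_get_ordered_points points → Spec_get_ordered_points points (get_ordered_points points)

-- ===== LEMMAS AND PROOFS =====

-- strict lexicographic order on points (Python's tuple '<')
def pvPlt (a b : Int × Int) : Prop := a.1 < b.1 ∨ (a.1 = b.1 ∧ a.2 < b.2)

theorem pvPlt_asymm {a b : Int × Int} (h1 : pvPlt a b) (h2 : pvPlt b a) : False := by
  rcases a with ⟨a1, a2⟩; rcases b with ⟨b1, b2⟩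
  simp only [pvPlt] at h1 h2; omega

theorem pvPlt_trans {a b c : Int × Int} (h1 : pvPlt a b) (h2 : pvPlt b c) : pvPlt a c := by
  rcases a with ⟨a1, a2⟩; rcases b with ⟨b1, b2⟩; rcases c with ⟨c1, c2⟩
  simp only [pvPlt] at h1 h2 ⊢; omega

theorem pvPlt_of_ne_of_not_gt {a b : Int × Int} (hne : a ≠ b) (h : ¬ pvPlt b a) : pvPlt a b := by
  rcases a with ⟨a1, a2⟩; rcases b with ⟨b1, b2⟩
  simp only [ne_eq, Prod.mk.injEq, not_and] at hne
  simp only [pvPlt] at h ⊢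
  by_cases h1 : a1 = b1
  · exact Or.inr ⟨h1, by have := hne h1; omega⟩
  · omega

-- the comparison sorted2 uses with fst/snd keys, and its meaning
def pvBefore (a b : Int × Int) : Bool :=
  decide (a.1 < b.1) || (!decide (b.1 < a.1) && decide (a.2 < b.2))

theorem pvBefore_iff (a b : Int × Int) : pvBefore a b = true ↔ pvPlt a b := by
  rcases a with ⟨a1, a2⟩; rcases b with ⟨b1, b2⟩
  simp only [pvBefore, pvPlt, Bool.or_eq_true, Bool.and_eq_true, Bool.not_eq_eq_eq_not,
    Bool.not_true, decide_eq_true_eq, decide_eq_false_iff_not]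
  omega

theorem pvSorted2_eq (xs : List (Int × Int)) :
    PySem.List.sorted2 xs Prod.fst Prod.snd false
      = xs.foldl (fun acc x => PySem.List.insertBy pvBefore x acc) [] := rfl

theorem pvInsert_pairwise (x : Int × Int) (acc : List (Int × Int))
    (h : acc.Pairwise (fun a b => ¬ pvPlt b a)) :
    (PySem.List.insertBy pvBefore x acc).Pairwise (fun a b => ¬ pvPlt b a) := by
  induction acc with
  | nil => simp [PySem.List.insertBy]
  | cons y ys ih =>
    rcases List.pairwise_cons.mp h with ⟨hy, hys⟩
    by_cases hb : pvBefore x y = true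
    · have hxy : pvPlt x y := (pvBefore_iff x y).mp hb
      rw [show PySem.List.insertBy pvBefore x (y :: ys) = x :: y :: ys from by
        simp [PySem.List.insertBy, hb]]
      refine List.pairwise_cons.mpr ⟨?_, h⟩
      intro z hz
      rcases List.mem_cons.mp hz with hzy | hzys
      · subst hzy; exact fun hc => pvPlt_asymm hxy hc
      · exact fun hc => (hy z hzys) (pvPlt_trans hc hxy)
    · have hnxy : ¬ pvPlt x y := fun hc => hb ((pvBefore_iff x y).mpr hc)
      rw [show PySem.List.insertBy pvBefore x (y :: ys) = y :: PySem.List.insertBy pvBefore x ys from by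
        simp [PySem.List.insertBy, hb]]
      refine List.pairwise_cons.mpr ⟨?_, ih hys⟩
      intro z hz
      rcases (PySem.List.mem_insertBy pvBefore x z ys).mp hz with hzx | hzys
      · subst hzx; exact hnxy
      · exact hy z hzys

theorem pvFold_pairwise (xs : List (Int × Int)) : ∀ acc, acc.Pairwise (fun a b => ¬ pvPlt b a) →
    (xs.foldl (fun acc x => PySem.List.insertBy pvBefore x acc) acc).Pairwise (fun a b => ¬ pvPlt b a) := by
  induction xs with
  | nil => intro acc h; simpa using h
  | cons x xs ih =>
    intro acc h
    simp only [List.foldl_cons]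
    exact ih _ (pvInsert_pairwise x acc h)

-- sorted(distinct points) is strictly lex-increasing
theorem pvSorted2_pairwise_lt (xs : List (Int × Int)) (hnd : xs.Nodup) :
    (PySem.List.sorted2 xs Prod.fst Prod.snd false).Pairwise pvPlt := by
  have h1 : (PySem.List.sorted2 xs Prod.fst Prod.snd false).Pairwise (fun a b => ¬ pvPlt b a) := by
    rw [pvSorted2_eq]; exact pvFold_pairwise xs [] (by simp)
  have hperm := PySem.List.sorted2_perm xs Prod.fst Prod.snd false
  have hnd2 : (PySem.List.sorted2 xs Prod.fst Prod.snd false).Nodup := hperm.nodup_iff.mpr hnd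
  have hne : (PySem.List.sorted2 xs Prod.fst Prod.snd false).Pairwise (· ≠ ·) := hnd2
  exact (hne.and h1).imp (fun h => pvPlt_of_ne_of_not_gt h.1 h.2)

-- pvAMin returns the lex minimum of a nonempty set
theorem pvAMin_spec {R : PySem.Set (Int × Int)} (hne : R ≠ []) :
    ∃ m, pvAMin R = some m ∧ m ∈ R ∧ ∀ y ∈ R, y ≠ m → pvPlt m y := by
  have hmapne : R.map Prod.fst ≠ [] := by simpa using hne
  rcases h1 : PySem.List.min? (R.map Prod.fst) (fun r => r) with _ | top
  · exact absurd ((PySem.List.min?_eq_none_iff _ _).mp h1) hmapne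
  · have htopmem := PySem.List.min?_mem h1
    have htopmin := PySem.List.min?_isMin h1
    obtain ⟨p0, hp0R, hp0top⟩ := List.mem_map.mp htopmem
    have hp0f : p0 ∈ R.filter (fun p => p.1 == top) :=
      List.mem_filter.mpr ⟨hp0R, by simp [hp0top]⟩
    have hfilne : (R.filter (fun p => p.1 == top)).map Prod.snd ≠ [] :=
      List.ne_nil_of_mem (List.mem_map_of_mem hp0f)
    rcases h2 : PySem.List.min? ((R.filter (fun p => p.1 == top)).map Prod.snd) (fun c => c) with _ | c
    · exact absurd ((PySem.List.min?_eq_none_iff _ _).mp h2) hfilne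
    · have hcmem := PySem.List.min?_mem h2
      have hcmin := PySem.List.min?_isMin h2
      obtain ⟨q, hqf, hqc⟩ := List.mem_map.mp hcmem
      rcases List.mem_filter.mp hqf with ⟨hqR, hqtop⟩
      rcases q with ⟨q1, q2⟩
      simp only [beq_iff_eq] at hqtop
      simp only at hqc
      have hmR : (top, c) ∈ R := by rw [← hqtop, ← hqc]; exact hqR
      refine ⟨(top, c), by simp only [pvAMin, h1, h2], hmR, ?_⟩
      rintro ⟨y1, y2⟩ hyR hyne
      have h3 : top ≤ y1 := htopmin _ (List.mem_map_of_mem hyR)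
      by_cases h4 : y1 = top
      · have hyf : (y1, y2) ∈ R.filter (fun p => p.1 == top) :=
          List.mem_filter.mpr ⟨hyR, by simp [h4]⟩
        have h5 : c ≤ y2 := hcmin _ (List.mem_map_of_mem hyf)
        have h6 : ¬(y1 = top ∧ y2 = c) := by
          intro hc; exact hyne (by simp [hc.1, hc.2])
        simp only [pvPlt]; omega
      · simp only [pvPlt]; omega

-- skip lemma: B's pointer loop reaches the lex minimum of the remaining set
theorem pvSkip (ord : List (Int × Int)) : ∀ (R : PySem.Set (Int × Int))
    (chains : List (List (Int × Int))) (m : Int × Int),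
    R ≠ [] → R.Nodup → (∀ x ∈ R, x ∈ ord) → ord.Pairwise pvPlt →
    m ∈ R → (∀ y ∈ R, y ≠ m → pvPlt m y) →
    ∃ rest, pvBMain ord R chains
        = pvBMain rest (pvBWalk (R.erase m) m [m]).2 (chains ++ [(pvBWalk (R.erase m) m [m]).1])
      ∧ (∀ x ∈ R.erase m, x ∈ rest) ∧ rest.Pairwise pvPlt := by
  induction ord with
  | nil =>
    intro R chains m hne _ hsub _ _ _
    obtain ⟨x, hx⟩ := List.exists_mem_of_ne_nil R hne
    exact absurd (hsub x hx) (List.not_mem_nil)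
  | cons o rest ih =>
    intro R chains m hne hnd hsub hord hmR hmin
    by_cases hoR : o ∈ R
    · have hom : o = m := by
        by_contra hne2
        have hmo : pvPlt m o := hmin o hoR hne2
        have hmrest : m ∈ rest := by
          rcases List.mem_cons.mp (hsub m hmR) with h | h
          · exact absurd h.symm hne2
          · exact h
        exact pvPlt_asymm hmo ((List.pairwise_cons.mp hord).1 m hmrest)
      subst hom
      refine ⟨rest, ?_, ?_, (List.pairwise_cons.mp hord).2⟩
      · rw [pvBMain.eq_def]; simp [hne, hoR]
      · intro x hx
        rcases (List.Nodup.mem_erase_iff hnd).mp hx with ⟨hxo, hxR⟩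
        rcases List.mem_cons.mp (hsub x hxR) with h | h
        · exact absurd h hxo
        · exact h
    · have hstep : pvBMain (o :: rest) R chains = pvBMain rest R chains := by
        rw [pvBMain.eq_def]; simp [hne, hoR]
      rw [hstep]
      refine ih R chains m hne hnd ?_ (List.pairwise_cons.mp hord).2 hmR hmin
      intro x hxR
      rcases List.mem_cons.mp (hsub x hxR) with h | h
      · exact absurd (h ▸ hxR) hoR
      · exact h

-- main correspondence: A's fused loop = B's walk followed by B's pointer loop
theorem pvMain (n : Nat) : ∀ (R : PySem.Set (Int × Int)) (ord : List (Int × Int))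
    (cur : Int × Int) (chain : List (Int × Int)) (acc : List (List (Int × Int))),
    R.length < n → R.Nodup → (∀ x ∈ R, x ∈ ord) → ord.Pairwise pvPlt →
    pvALoop R cur chain acc
      = pvBMain ord (pvBWalk R cur chain).2 (acc ++ [(pvBWalk R cur chain).1]) := by
  induction n with
  | zero => intro R ord cur chain acc hlen; exact absurd hlen (Nat.not_lt_zero _)
  | succ n ih =>
    intro R ord cur chain acc hlen hnd hsub hord
    by_cases hR : R = []
    · subst hR
      have hw : pvBWalk [] cur chain = (chain, ([] : PySem.Set (Int × Int))) := by
        rw [pvBWalk.eq_def]; split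
        · next p hp => exact absurd (List.find?_some hp) (by simp [PySem.Set.contains])
        · rfl
      rw [hw, pvALoop.eq_def, pvBMain.eq_def]; simp
    · rcases hf : (get_orthogonal_plants cur).find? (fun p => PySem.Set.contains R p) with _ | p
      · -- no neighbour: A restarts, B's walk returns and its pointer loop takes over
        have hw : pvBWalk R cur chain = (chain, R) := by
          rw [pvBWalk.eq_def]; split
          · next p hp =>
              have hp' : (get_orthogonal_plants cur).find? (fun p => PySem.Set.contains R p) = some p := hp
              rw [hf] at hp'; simp at hp'
          · rfl
        rw [hw]
        obtain ⟨m, hm, hmR, hmin⟩ := pvAMin_spec hR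
        have hA : pvALoop R cur chain acc = pvALoop (R.erase m) m [m] (acc ++ [chain]) := by
          rw [pvALoop.eq_def, if_neg hR]
          split
          · next q hq => rw [hf] at hq; simp at hq
          · next hq =>
              split
              · next hm2 => rw [hm] at hm2; simp at hm2
              · next m2 hm2 =>
                  rw [hm] at hm2
                  injection hm2 with hm2; subst hm2; rfl
        rw [hA]
        obtain ⟨rest, hEq, hsub', hord'⟩ := pvSkip ord R (acc ++ [chain]) m hR hnd hsub hord hmR hmin
        rw [hEq]
        have hlen' : (R.erase m).length < n := by
          have := List.length_erase_of_mem hmR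
          have := List.length_pos_of_mem hmR
          omega
        exact ih (R.erase m) rest m [m] (acc ++ [chain]) hlen' (List.Nodup.erase m hnd) hsub' hord'
      · -- neighbour found: both walks step identically
        have hpR : p ∈ R := by
          have := List.find?_some hf
          simpa [PySem.Set.contains] using this
        have hA : pvALoop R cur chain acc = pvALoop (R.erase p) p (chain ++ [p]) acc := by
          rw [pvALoop.eq_def, if_neg hR]
          split
          · next q hq => rw [hf] at hq; injection hq with hq; subst hq; rfl
          · next hq => rw [hf] at hq; simp at hq
        have hB : pvBWalk R cur chain = pvBWalk (R.erase p) p (chain ++ [p]) := by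
          rw [pvBWalk.eq_def]; split
          · next q hq =>
              have hq' : (get_orthogonal_plants cur).find? (fun x => PySem.Set.contains R x) = some q := hq
              rw [hf] at hq'; injection hq' with hq'; subst hq'; rfl
          · next hq =>
              have hq' : (get_orthogonal_plants cur).find? (fun x => PySem.Set.contains R x) = none := hq
              rw [hf] at hq'; simp at hq'
        rw [hA, hB]
        have hlen' : (R.erase p).length < n := by
          have := List.length_erase_of_mem hpR
          have := List.length_pos_of_mem hpR
          omega
        exact ih (R.erase p) ord p (chain ++ [p]) acc hlen' (List.Nodup.erase p hnd)
          (fun x hx => hsub x (List.mem_of_mem_erase hx)) hord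

-- ===== VERDICT (by name: the statement is the Claim_ definition above) =====
theorem get_ordered_points_spec : Claim_equal_get_ordered_points := by
  intro points _ hpre
  unfold Spec_get_ordered_points get_ordered_points get_ordered_points_alt
  have hRne : PySem.Set.ofList points ≠ [] := by
    obtain ⟨x, hx⟩ := List.exists_mem_of_ne_nil points hpre
    exact List.ne_nil_of_mem ((PySem.Set.mem_ofList points x).mpr hx)
  have hnd : (PySem.Set.ofList points).Nodup := PySem.Set.nodup_ofList points
  obtain ⟨m, hm, hmR, hmin⟩ := pvAMin_spec hRne
  have hperm := PySem.List.sorted2_perm (PySem.Set.ofList points) Prod.fst Prod.snd false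
  have hsub : ∀ x ∈ PySem.Set.ofList points,
      x ∈ PySem.List.sorted2 (PySem.Set.ofList points) Prod.fst Prod.snd false :=
    fun x hx => hperm.mem_iff.mpr hx
  have hord := pvSorted2_pairwise_lt (PySem.Set.ofList points) hnd
  obtain ⟨rest, hEq, hsub', hord'⟩ :=
    pvSkip (PySem.List.sorted2 (PySem.Set.ofList points) Prod.fst Prod.snd false)
      (PySem.Set.ofList points) [] m hRne hnd hsub hord hmR hmin
  simp only [hm, hEq]
  have hlen' : ((PySem.Set.ofList points).erase m).length < (PySem.Set.ofList points).length := by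
    have := List.length_erase_of_mem hmR
    have := List.length_pos_of_mem hmR
    omega
  exact pvMain (PySem.Set.ofList points).length ((PySem.Set.ofList points).erase m) rest m [m] []
    hlen' (List.Nodup.erase m hnd) hsub' hord'
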